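-- pv_equiv track=rewrite | github.com/Rawda1452/task9-1 | Task9 remove frequency.py | min_removals_to_equal_frequency
-- ===== SOURCE A (Python) =====
-- def min_removals_to_equal_frequency(s):
--     char_count = {}
--     for char in s:
--         if char in char_count:
--             char_count[char] += 1
--         else:
--             char_count[char] = 1
--
--     freq_count = {}
--     for freq in char_count.values():
--         if freq in freq_count:
--             freq_count[freq] += 1
--         else:
--             freq_count[freq] = 1
--
--     if len(freq_count) == 1:
--         return 0
--
--     min_removals = float('inf')
--
--     for freq in freq_count:
--         current_removals = 0
--         for char_freq, count in freq_count.items():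
--             if char_freq != freq:
--                 if char_freq > freq:
--                     current_removals += (char_freq - freq) * count
--                 else:
--                     current_removals += char_freq * count
--
--         min_removals = min(min_removals, current_removals)
--
--     return min_removals
-- ===== SOURCE B (Python) =====
-- def min_removals_to_equal_frequency(s):
--     counts = {}
--     for ch in s:
--         counts[ch] = counts.get(ch, 0) + 1
--     fc = {}
--     for f in counts.values():
--         fc[f] = fc.get(f, 0) + 1
--     total_w = sum(f * c for f, c in fc.items())
--     total_c = sum(fc.values())
--     best, seen = None, 0
--     for f in sorted(fc):
--         r = total_w - f * (total_c - seen)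
--         if best is None or r < best:
--             best = r
--         seen += fc[f]
--     return best if best is not None else 0
-- ===== Notes on version B (the rewrite author's own statement) =====
-- stated objective: alternative
-- what changed: Replaces A's double loop over distinct frequencies (a full inner rescan per candidate) with sorting the distinct frequencies once and a single running-sum sweep that derives each candidate's removal cost from precomputed totals; intended as asymptotically better in the number of distinct frequencies, not confirmed faster in a timing run (1.34x at the largest size).
-- outside the precondition, e.g. on min_removals_to_equal_frequency(''): A returns inf, B returns 0
import Mathlib
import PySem

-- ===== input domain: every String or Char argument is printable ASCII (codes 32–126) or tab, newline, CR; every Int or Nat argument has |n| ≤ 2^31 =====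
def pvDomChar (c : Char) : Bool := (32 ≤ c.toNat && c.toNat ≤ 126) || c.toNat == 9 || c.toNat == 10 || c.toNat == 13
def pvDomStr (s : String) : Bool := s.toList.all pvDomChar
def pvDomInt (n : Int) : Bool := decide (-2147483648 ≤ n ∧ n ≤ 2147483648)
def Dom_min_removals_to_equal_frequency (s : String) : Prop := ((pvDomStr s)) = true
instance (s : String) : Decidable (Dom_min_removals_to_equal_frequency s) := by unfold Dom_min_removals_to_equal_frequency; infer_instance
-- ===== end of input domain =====

-- B replaces A's double loop over distinct frequencies (full rescan per candidate) by sorting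
-- them once and a single running-sum sweep deriving each candidate's removal cost from totals.

-- ===== PORT A =====
def min_removals_to_equal_frequency (s : String) : Int :=
  let char_count : PySem.Dict Char Int :=
    s.toList.foldl (fun d c =>
      if d.contains c then d.insert c (d.getD c 0 + 1) else d.insert c 1) PySem.Dict.empty
  let freq_count : PySem.Dict Int Int :=
    char_count.values.foldl (fun d f =>
      if d.contains f then d.insert f (d.getD f 0 + 1) else d.insert f 1) PySem.Dict.empty
  if freq_count.size = 1 then 0
  else
    let best : Option Int :=
      freq_count.keys.foldl (fun best freq =>
        let cur : Int := freq_count.items.foldl (fun cur p =>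
          if p.1 ≠ freq then
            if p.1 > freq then cur + (p.1 - freq) * p.2 else cur + p.1 * p.2
          else cur) 0
        some (match best with | none => cur | some m => min m cur)) none
    -- Python's min_removals starts at an infinite float (modelled as none); it stays infinite
    -- only when freq_count is empty, i.e. s = "", which Pre_ excludes (Python returns a float there).
    match best with
    | none => 0
    | some m => m

-- ===== PORT B =====
def min_removals_to_equal_frequency_alt (s : String) : Int :=
  let counts : PySem.Dict Char Int :=
    s.toList.foldl (fun d c => d.insert c (d.getD c 0 + 1)) PySem.Dict.empty
  let fc : PySem.Dict Int Int :=
    counts.values.foldl (fun d f => d.insert f (d.getD f 0 + 1)) PySem.Dict.empty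
  let totalW : Int := (fc.items.map (fun p => p.1 * p.2)).sum
  let totalC : Int := fc.values.sum
  let st := (PySem.List.sorted fc.keys (fun x => x) false).foldl
    (fun (st : Option Int × Int) f =>
      let r := totalW - f * (totalC - st.2)
      let best : Option Int :=
        match st.1 with
        | none => some r
        | some b => if r < b then some r else some b
      (best, st.2 + fc.getD f 0))   -- fc[f]: f is always a key of fc, so getD is exact
    (none, 0)
  match st.1 with
  | none => 0
  | some b => b

-- ===== PRECONDITION & SPEC =====
-- Pre_ excludes only the empty string, on which Python A returns an infinite float —
-- not an int of the declared return type; B returns 0 there.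
def Pre_min_removals_to_equal_frequency (s : String) : Prop := s ≠ ""
instance (s : String) : Decidable (Pre_min_removals_to_equal_frequency s) := by
  unfold Pre_min_removals_to_equal_frequency; infer_instance
def pvWitness_min_removals_to_equal_frequency : String := "aab"

def Spec_min_removals_to_equal_frequency (s : String) (out : Int) : Prop :=
  out = min_removals_to_equal_frequency_alt s
instance (s : String) (out : Int) : Decidable (Spec_min_removals_to_equal_frequency s out) := by
  unfold Spec_min_removals_to_equal_frequency; infer_instance

-- ===== CLAIM (what is proved, stated in full; the proofs are below) =====
def Claim_equal_min_removals_to_equal_frequency : Prop :=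
  ∀ (s : String), Dom_min_removals_to_equal_frequency s →
    Pre_min_removals_to_equal_frequency s →
    Spec_min_removals_to_equal_frequency s (min_removals_to_equal_frequency s)

-- ===== LEMMAS AND PROOFS =====

-- "min so far" step shared by both rewritten folds (none = Python's infinite-float start)
def pvStepMin (b : Option Int) (r : Int) : Option Int :=
  match b with | none => some r | some m => some (min m r)

-- the removal cost A computes for candidate frequency f, as a sum over the freq-count items
def pvRemovals (F : List (Int × Int)) (f : Int) : Int :=
  (F.map (fun p => if f ≤ p.1 then (p.1 - f) * p.2 else p.1 * p.2)).sum

theorem pv_count_step {α : Type} [BEq α] [LawfulBEq α] :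
    (fun (d : PySem.Dict α Int) c =>
      if d.contains c then d.insert c (d.getD c 0 + 1) else d.insert c 1)
    = (fun (d : PySem.Dict α Int) c => d.insert c (d.getD c 0 + 1)) := by
  funext d c
  by_cases h : d.contains c = true
  · simp [h]
  · have h' : d.contains c = false := by simpa using h
    have hg : d.getD c 0 = 0 := PySem.Dict.getD_of_not_contains d 0 h'
    simp [h', hg]

theorem pv_inner (F : List (Int × Int)) (f : Int) (a : Int) :
    F.foldl (fun cur p =>
      if p.1 ≠ f then
        if p.1 > f then cur + (p.1 - f) * p.2 else cur + p.1 * p.2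
      else cur) a
    = a + pvRemovals F f := by
  induction F generalizing a with
  | nil => simp [pvRemovals]
  | cons p t ih =>
    simp only [List.foldl_cons]
    rw [ih]
    simp only [pvRemovals, List.map_cons, List.sum_cons]
    rcases lt_trichotomy p.1 f with h | h | h
    · rw [if_pos (by omega), if_neg (by omega), if_neg (by omega)]; ring
    · rw [if_neg (by omega), if_pos (by omega)]
      have : (p.1 - f) * p.2 = 0 := by rw [h]; ring
      rw [this]; ring
    · rw [if_pos (by omega), if_pos (by omega), if_pos (by omega)]; ring

theorem pv_stepB_eq (b : Option Int) (r : Int) :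
    (match b with
     | none => some r
     | some m => if r < m then some r else some m) = pvStepMin b r := by
  cases b with
  | none => rfl
  | some m =>
    simp only [pvStepMin, min_def]
    by_cases h : r < m
    · rw [if_pos h, if_neg (by omega)]
    · rw [if_neg h, if_pos (by omega)]

theorem pv_sum_sub (l : List Int) (g h : Int → Int) :
    (l.map (fun k => g k - h k)).sum = (l.map g).sum - (l.map h).sum := by
  induction l with
  | nil => simp
  | cons x t ih => simp only [List.map_cons, List.sum_cons, ih]; ring

theorem pv_sum_mul (l : List Int) (f : Int) (h : Int → Int) :
    (l.map (fun k => f * h k)).sum = f * (l.map h).sum := by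
  induction l with
  | nil => simp
  | cons x t ih => simp only [List.map_cons, List.sum_cons, ih]; ring

-- the running-sum cost equals A's full-scan cost, for a strictly split candidate list
theorem pv_rval (cnt : Int → Int) (f : Int) (done rest : List Int)
    (hd : ∀ k ∈ done, k < f) (hr : ∀ k ∈ rest, f < k) :
    ((done ++ f :: rest).map (fun k => k * cnt k)).sum
      - f * (((done ++ f :: rest).map cnt).sum - (done.map cnt).sum)
    = ((done ++ f :: rest).map (fun k => if f ≤ k then (k - f) * cnt k else k * cnt k)).sum := by
  have h1 : done.map (fun k => if f ≤ k then (k - f) * cnt k else k * cnt k)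
      = done.map (fun k => k * cnt k) :=
    List.map_congr_left (fun k hk => by rw [if_neg (by have := hd k hk; omega)])
  have h2 : rest.map (fun k => if f ≤ k then (k - f) * cnt k else k * cnt k)
      = rest.map (fun k => k * cnt k - f * cnt k) :=
    List.map_congr_left (fun k hk => by rw [if_pos (le_of_lt (hr k hk))]; ring)
  have h3 : (rest.map (fun k => f * cnt k)).sum = f * (rest.map cnt).sum := pv_sum_mul rest f cnt
  simp only [List.map_append, List.sum_append, List.map_cons, List.sum_cons, h1, h2, pv_sum_sub,
    h3, if_pos (le_refl f)]
  ring

-- B's sweep over the sorted keys equals folding pvStepMin over the per-candidate costs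
theorem pv_loopB (cnt : Int → Int) (W C : Int) (SK : List Int)
    (hW : W = (SK.map (fun k => k * cnt k)).sum)
    (hC : C = (SK.map cnt).sum)
    (hsort : SK.Pairwise (· < ·)) :
    ∀ (l done : List Int), SK = done ++ l → ∀ (b : Option Int),
    (l.foldl (fun (st : Option Int × Int) f =>
        (pvStepMin st.1 (W - f * (C - st.2)), st.2 + cnt f)) (b, (done.map cnt).sum)).1
    = l.foldl (fun bb f =>
        pvStepMin bb ((SK.map (fun k => if f ≤ k then (k - f) * cnt k else k * cnt k)).sum)) b := by
  intro l
  induction l with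
  | nil => intro done _ b; rfl
  | cons f t ih =>
    intro done hsplit b
    have hpw := hsplit ▸ hsort
    rw [List.pairwise_append] at hpw
    have hd : ∀ k ∈ done, k < f := fun k hk => hpw.2.2 k hk f (List.mem_cons_self)
    have hr : ∀ k ∈ t, f < k := (List.pairwise_cons.mp hpw.2.1).1
    have hrv : W - f * (C - (done.map cnt).sum)
        = (SK.map (fun k => if f ≤ k then (k - f) * cnt k else k * cnt k)).sum := by
      rw [hW, hC, hsplit]; exact pv_rval cnt f done t hd hr
    simp only [List.foldl_cons]
    rw [hrv]
    have hsum : (done.map cnt).sum + cnt f = ((done ++ [f]).map cnt).sum := by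
      simp
    rw [hsum]
    exact ih (done ++ [f]) (by simpa using hsplit) _

theorem pv_stepMin_rcomm (b : Option Int) (x y : Int) :
    pvStepMin (pvStepMin b x) y = pvStepMin (pvStepMin b y) x := by
  cases b <;> simp [pvStepMin, min_def] <;> omega

theorem pv_core (fc : PySem.Dict Int Int) (hnd : fc.keys.Nodup) :
    (if fc.size = 1 then (0 : Int)
     else
       match fc.keys.foldl (fun best freq =>
           let cur : Int := fc.items.foldl (fun cur p =>
             if p.1 ≠ freq then
               if p.1 > freq then cur + (p.1 - freq) * p.2 else cur + p.1 * p.2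
             else cur) 0
           some (match best with | none => cur | some m => min m cur)) none with
       | none => 0
       | some m => m)
    = (let totalW : Int := (fc.items.map (fun p => p.1 * p.2)).sum
       let totalC : Int := fc.values.sum
       let st := (PySem.List.sorted fc.keys (fun x => x) false).foldl
         (fun (st : Option Int × Int) f =>
           let r := totalW - f * (totalC - st.2)
           let best : Option Int :=
             match st.1 with
             | none => some r
             | some b => if r < b then some r else some b
           (best, st.2 + fc.getD f 0)) (none, 0)
       match st.1 with | none => 0 | some b => b) := by
  have hF : fc.items = fc.keys.map (fun k => (k, fc.getD k 0)) :=
    PySem.Dict.items_eq_map_keys fc hnd 0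
  have hperm : (PySem.List.sorted fc.keys (fun x => x) false).Perm fc.keys :=
    PySem.List.sorted_perm fc.keys (fun x => x) false
  have hpw : (PySem.List.sorted fc.keys (fun x => x) false).Pairwise (· < ·) := by
    have h1 := PySem.List.sorted_pairwise fc.keys (fun x => x)
    have h2 : (PySem.List.sorted fc.keys (fun x => x) false).Nodup := hperm.nodup_iff.mpr hnd
    exact (List.Pairwise.and h1 h2).imp (fun h => lt_of_le_of_ne h.1 h.2)
  have hvals : fc.values = fc.items.map (fun p => p.2) := rfl
  have hW : (fc.items.map (fun p => p.1 * p.2)).sum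
      = ((PySem.List.sorted fc.keys (fun x => x) false).map (fun k => k * fc.getD k 0)).sum := by
    rw [hF, List.map_map]
    exact ((hperm.map (fun k => k * fc.getD k 0)).sum_eq).symm
  have hC : fc.values.sum
      = ((PySem.List.sorted fc.keys (fun x => x) false).map (fun k => fc.getD k 0)).sum := by
    rw [hvals, hF, List.map_map]
    exact ((hperm.map (fun k => fc.getD k 0)).sum_eq).symm
  have hrm : ∀ f : Int, pvRemovals fc.items f
      = ((PySem.List.sorted fc.keys (fun x => x) false).map
          (fun k => if f ≤ k then (k - f) * fc.getD k 0 else k * fc.getD k 0)).sum := by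
    intro f
    unfold pvRemovals
    rw [hF, List.map_map]
    exact ((hperm.map (fun k => if f ≤ k then (k - f) * fc.getD k 0 else k * fc.getD k 0)).sum_eq).symm
  by_cases hsz : fc.size = 1
  · -- single distinct frequency: A returns 0 early, B's single sweep step computes 0
    rw [if_pos hsz]
    have hlen : fc.keys.length = 1 := by
      have : fc.items.length = 1 := hsz
      rw [hF, List.length_map] at this
      exact this
    obtain ⟨k, hk⟩ := List.length_eq_one_iff.mp hlen
    have hsk : PySem.List.sorted [k] (fun x : Int => x) false = [k] :=
      PySem.List.sorted_eq_self_of_pairwise [k] (fun x => x) (List.pairwise_singleton _ _)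
    simp [hvals, hF, hk, hsk]
  · rw [if_neg hsz]
    have hstepA : (fun (best : Option Int) freq =>
        let cur : Int := fc.items.foldl (fun cur p =>
          if p.1 ≠ freq then
            if p.1 > freq then cur + (p.1 - freq) * p.2 else cur + p.1 * p.2
          else cur) 0
        some (match best with | none => cur | some m => min m cur))
        = fun b f => pvStepMin b (pvRemovals fc.items f) := by
      funext b f
      simp only [pv_inner, zero_add]
      cases b <;> rfl
    have hstepB : (fun (st : Option Int × Int) f =>
        let r := (fc.items.map (fun p => p.1 * p.2)).sum - f * (fc.values.sum - st.2)
        let best : Option Int :=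
          match st.1 with
          | none => some r
          | some b => if r < b then some r else some b
        (best, st.2 + fc.getD f 0))
        = fun (st : Option Int × Int) f =>
            (pvStepMin st.1 ((fc.items.map (fun p => p.1 * p.2)).sum
               - f * (fc.values.sum - st.2)), st.2 + fc.getD f 0) := by
      funext st f
      exact Prod.ext (pv_stepB_eq st.1 _) rfl
    have hloop := pv_loopB (fun k => fc.getD k 0)
      ((fc.items.map (fun p => p.1 * p.2)).sum) (fc.values.sum)
      (PySem.List.sorted fc.keys (fun x => x) false) hW hC hpw
      (PySem.List.sorted fc.keys (fun x => x) false) [] rfl none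
    simp only [List.map_nil, List.sum_nil] at hloop
    have hX : fc.keys.foldl (fun b f => pvStepMin b (pvRemovals fc.items f)) none
        = ((PySem.List.sorted fc.keys (fun x => x) false).foldl
            (fun (st : Option Int × Int) f =>
              (pvStepMin st.1 ((fc.items.map (fun p => p.1 * p.2)).sum
                 - f * (fc.values.sum - st.2)), st.2 + fc.getD f 0)) (none, 0)).1 := by
      rw [hloop]
      simp only [hrm]
      rw [← List.foldl_map (f := fun f : Int =>
            ((PySem.List.sorted fc.keys (fun x => x) false).map
              (fun k => if f ≤ k then (k - f) * fc.getD k 0 else k * fc.getD k 0)).sum)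
          (g := pvStepMin),
        ← List.foldl_map (f := fun f : Int =>
            ((PySem.List.sorted fc.keys (fun x => x) false).map
              (fun k => if f ≤ k then (k - f) * fc.getD k 0 else k * fc.getD k 0)).sum)
          (g := pvStepMin)]
      exact @List.Perm.foldl_eq _ _ pvStepMin _ _ ⟨fun b x y => pv_stepMin_rcomm b x y⟩
        (List.Perm.map _ hperm.symm) none
    simp only [hstepA, hstepB, hX]

theorem pv_main (s : String) (_hs : s ≠ "") :
    min_removals_to_equal_frequency s = min_removals_to_equal_frequency_alt s := by
  unfold min_removals_to_equal_frequency min_removals_to_equal_frequency_alt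
  rw [pv_count_step (α := Char), pv_count_step (α := Int)]
  exact pv_core _ (PySem.Dict.nodup_keys_foldl_insert _ _ _ PySem.Dict.nodup_keys_empty)

-- ===== VERDICT (by name: the statement is the Claim_ definition above) =====
theorem min_removals_to_equal_frequency_spec : Claim_equal_min_removals_to_equal_frequency := by
  intro s _hdom hpre
  exact pv_main s hpre
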